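-- pv_equiv track=rewrite | github.com/remoo69/Sheesh-Compiler | COMPILER/tokenclass.py | is_Text
-- ===== SOURCE A (Python) =====
-- def is_Text(Token: str) -> bool: #rewritten with gpt
--     if not Token.startswith('"') or not Token.endswith('"'):
--         return False
--
--     escaped = False
--     for char in Token[1:-1]:
--         if escaped:
--             escaped = False
--         elif char == '\\':
--             escaped = True
--         elif char == '"':
--             return False
--
--     return not escaped
-- ===== SOURCE B (Python) =====
-- def is_Text(Token: str) -> bool:
--     if not Token.startswith('"') or not Token.endswith('"'):
--         return False
--     body = Token[1:-1]
--     # delete every backslash-plus-next-char escape pair, keep everything else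
--     kept = []
--     i = 0
--     while i < len(body):
--         if body[i] == '\\' and i + 1 < len(body):
--             i += 2
--         else:
--             kept.append(body[i])
--             i += 1
--     cleaned = ''.join(kept)
--     return '"' not in cleaned and '\\' not in cleaned
-- ===== Notes on version B (the rewrite author's own statement) =====
-- stated objective: alternative
-- what changed: Replaces A's single-pass escaped-flag state machine with early return by a remove-escape-pairs pass that builds the cleaned body and then two membership checks for a surviving quote or dangling backslash.
import Mathlib
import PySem

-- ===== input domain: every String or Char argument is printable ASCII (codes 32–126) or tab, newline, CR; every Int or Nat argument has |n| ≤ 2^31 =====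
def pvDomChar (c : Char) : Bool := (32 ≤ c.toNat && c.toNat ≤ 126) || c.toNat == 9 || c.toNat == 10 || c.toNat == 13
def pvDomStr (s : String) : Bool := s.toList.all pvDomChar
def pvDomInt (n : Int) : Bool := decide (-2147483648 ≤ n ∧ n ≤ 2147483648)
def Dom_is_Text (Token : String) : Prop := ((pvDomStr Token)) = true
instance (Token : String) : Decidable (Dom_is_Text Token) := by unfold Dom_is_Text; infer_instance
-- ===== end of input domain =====

-- B replaces A's escaped-flag state machine by removing escape pairs and checking membership (alternative decomposition, same cost).


-- ===== PORT A =====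
-- the for-loop over Token[1:-1] carrying the `escaped` flag, with early return on an unescaped quote
def isTextLoop : List Char → Bool → Bool
  | [], escaped => !escaped
  | c :: rest, escaped =>
    if escaped then isTextLoop rest false
    else if c = '\\' then isTextLoop rest true
    else if c = '"' then false
    else isTextLoop rest escaped

def is_Text (Token : String) : Bool :=
  if !(PySem.Str.startswith Token "\"") || !(PySem.Str.endswith Token "\"") then false
  else isTextLoop (PySem.List.slice Token.toList (some 1) (some (-1))) false

-- ===== PORT B =====
-- Source B's while loop over indices: skip backslash-plus-next-char pairs, keep the rest
def cleanFrom (body : List Char) (i : Nat) : List Char :=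
  if h : i < body.length then
    if body[i] = '\\' ∧ i + 1 < body.length then cleanFrom body (i + 2)
    else body[i] :: cleanFrom body (i + 1)
  else []
termination_by body.length - i

def is_Text_alt (Token : String) : Bool :=
  if !(PySem.Str.startswith Token "\"") || !(PySem.Str.endswith Token "\"") then false
  else
    let body := PySem.List.slice Token.toList (some 1) (some (-1))
    let cleaned := cleanFrom body 0
    !cleaned.contains '"' && !cleaned.contains '\\'

-- ===== PRECONDITION & SPEC =====
def Spec_is_Text (Token : String) (out : Bool) : Prop := out = is_Text_alt Token
instance (Token : String) (out : Bool) : Decidable (Spec_is_Text Token out) := by unfold Spec_is_Text; infer_instance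

-- ===== CLAIM (what is proved, stated in full; the proofs are below) =====
def Claim_equal_is_Text : Prop := ∀ (Token : String), Dom_is_Text Token → Spec_is_Text Token (is_Text Token)

-- ===== LEMMAS AND PROOFS =====
-- structural (list) form of cleanFrom
def cleanL : List Char → List Char
  | [] => []
  | c :: rest =>
    if c = '\\' then
      match rest with
      | [] => [c]
      | _ :: r => cleanL r
    else c :: cleanL rest

theorem cleanL_bs (d : Char) (r : List Char) : cleanL ('\\' :: d :: r) = cleanL r := by
  simp [cleanL]

theorem cleanL_cons {c : Char} (hb : c ≠ '\\') (rest : List Char) :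
    cleanL (c :: rest) = c :: cleanL rest := by
  rw [cleanL.eq_def]
  simp [hb]

theorem cleanFrom_eq_cleanL (body : List Char) (i : Nat) :
    cleanFrom body i = cleanL (body.drop i) := by
  rw [cleanFrom]
  split
  · rename_i h
    have hdrop : body.drop i = body[i] :: body.drop (i + 1) := List.drop_eq_getElem_cons h
    split
    · rename_i hp
      obtain ⟨hb, hlt⟩ := hp
      have hdrop2 : body.drop (i + 1) = body[i + 1] :: body.drop (i + 2) :=
        List.drop_eq_getElem_cons hlt
      rw [cleanFrom_eq_cleanL body (i + 2), hdrop, hdrop2, hb, cleanL_bs]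
    · rename_i hp
      rw [cleanFrom_eq_cleanL body (i + 1), hdrop]
      by_cases hb : body[i] = '\\'
      · have hge : ¬ i + 1 < body.length := by tauto
        have hnil : body.drop (i + 1) = [] := List.drop_eq_nil_of_le (by omega)
        simp [hb, hnil, cleanL]
      · rw [cleanL_cons hb]
  · rename_i h
    rw [List.drop_eq_nil_of_le (by omega), cleanL]
termination_by body.length - i

theorem loop_eq_clean (l : List Char) :
    isTextLoop l false = (!(cleanL l).contains '"' && !(cleanL l).contains '\\') := by
  match l with
  | [] => simp [isTextLoop, cleanL]
  | c :: rest =>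
    by_cases hb : c = '\\'
    · subst hb
      match rest with
      | [] => simp [isTextLoop, cleanL]
      | d :: r =>
        have ih := loop_eq_clean r
        simpa [isTextLoop, cleanL_bs] using ih
    · by_cases hq : c = '"'
      · subst hq
        rw [cleanL_cons hb]
        simp [isTextLoop]
      · have ih := loop_eq_clean rest
        have hb' : ('\\' : Char) ≠ c := fun h => hb h.symm
        have hq' : ('"' : Char) ≠ c := fun h => hq h.symm
        rw [cleanL_cons hb]
        simp [isTextLoop, hb, hq, hb', hq', ih]
termination_by l.length

-- ===== VERDICT (by name: the statement is the Claim_ definition above) =====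
theorem is_Text_spec : Claim_equal_is_Text := by
  intro Token _
  unfold Spec_is_Text is_Text is_Text_alt
  split
  · rfl
  · simp only [cleanFrom_eq_cleanL, List.drop_zero]
    exact loop_eq_clean _
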